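-- pv_equiv track=rewrite | github.com/Jungle-7-Algorithm-study/Algorithm-Study | 최승현/leet/string/1071.py | can_divide
-- ===== SOURCE A (Python) =====
-- def can_divide(dividend: str, divisor: str) -> bool:
--     l1, l2 = len(dividend), len(divisor)
--     if l1 % l2 != 0:
--         return False
--     for start in range(0, l1, l2):
--         substr = dividend[start : start + l2]
--         if substr != divisor:
--             return False
--
--     return True
-- ===== SOURCE B (Python) =====
-- def can_divide(dividend: str, divisor: str) -> bool:
--     return dividend == divisor * (len(dividend) // len(divisor))
-- ===== Notes on version B (the rewrite author's own statement) =====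
-- stated objective: idiomatic
-- what changed: Replaces the chunk-by-chunk slice comparison loop (after a divisibility pre-check) with a single closed-form equality against the divisor repeated len(dividend)//len(divisor) times.
import Mathlib
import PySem

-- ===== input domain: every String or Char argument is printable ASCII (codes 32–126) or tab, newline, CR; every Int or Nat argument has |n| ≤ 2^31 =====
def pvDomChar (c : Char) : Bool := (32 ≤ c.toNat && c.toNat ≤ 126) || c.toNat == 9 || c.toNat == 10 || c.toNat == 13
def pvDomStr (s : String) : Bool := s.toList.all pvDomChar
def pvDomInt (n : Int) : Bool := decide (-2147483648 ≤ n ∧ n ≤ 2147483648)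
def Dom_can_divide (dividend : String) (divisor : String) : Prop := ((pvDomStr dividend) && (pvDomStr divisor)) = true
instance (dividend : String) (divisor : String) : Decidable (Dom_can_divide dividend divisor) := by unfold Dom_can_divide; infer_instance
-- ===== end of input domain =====

-- B replaces A's divisibility check + chunk-comparison loop with one closed-form equality
-- against the divisor repeated len(dividend) // len(divisor) times (idiomatic one-liner).

-- ===== PORT A =====
def can_divide (dividend : String) (divisor : String) : Bool :=
  let l1 := PySem.Str.len dividend
  let l2 := PySem.Str.len divisor
  if PySem.Int.mod l1 l2 ≠ 0 then false
  else
    -- for start in range(0, l1, l2): early return False on a mismatching chunk = all chunks match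
    (PySem.List.pyRange 0 l1 l2).all (fun start =>
      PySem.List.slice dividend.toList (some start) (some (start + l2)) == divisor.toList)

-- ===== PORT B =====
-- Python string repetition 'divisor * n' ported by hand as flatten (replicate n.toNat …);
-- exact for n ≥ 0 (and Python gives '' for n ≤ 0, matching toNat's clamp).
def can_divide_alt (dividend : String) (divisor : String) : Bool :=
  dividend.toList ==
    (List.replicate
      (PySem.Int.floordiv (PySem.Str.len dividend) (PySem.Str.len divisor)).toNat
      divisor.toList).flatten

-- ===== PRECONDITION & SPEC =====
-- Pre_ excludes only divisor = "", on which A raises ZeroDivisionError (l1 % l2).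
def Pre_can_divide (dividend : String) (divisor : String) : Prop := divisor ≠ ""
instance (dividend : String) (divisor : String) : Decidable (Pre_can_divide dividend divisor) := by unfold Pre_can_divide; infer_instance
def pvWitness_can_divide : String × String := ("abab", "ab")
def Spec_can_divide (dividend : String) (divisor : String) (out : Bool) : Prop := out = can_divide_alt dividend divisor
instance (dividend : String) (divisor : String) (out : Bool) : Decidable (Spec_can_divide dividend divisor out) := by unfold Spec_can_divide; infer_instance

-- ===== CLAIM (what is proved, stated in full; the proofs are below) =====
def Claim_equal_can_divide : Prop := ∀ (dividend : String) (divisor : String), Dom_can_divide dividend divisor → Pre_can_divide dividend divisor → Spec_can_divide dividend divisor (can_divide dividend divisor)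

-- ===== LEMMAS AND PROOFS =====

-- the chunk characterisation: all l2-chunks equal v ↔ d is v repeated n times
lemma chunks_iff (v : List Char) (hv : v ≠ []) :
    ∀ (n : ℕ) (d : List Char), d.length = n * v.length →
      ((∀ k < n, (d.drop (k * v.length)).take v.length = v) ↔ d = (List.replicate n v).flatten) := by
  intro n
  induction n with
  | zero =>
    intro d hd
    simp at hd
    simp [hd]
  | succ n ih =>
    intro d hd
    have hl2 : 0 < v.length := List.length_pos_iff.mpr hv
    constructor
    · intro h
      have h0 := h 0 (Nat.succ_pos n)
      simp at h0
      have hdrop : (d.drop v.length).length = n * v.length := by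
        simp [hd, Nat.succ_mul]
      have hrest : d.drop v.length = (List.replicate n v).flatten := by
        refine (ih (d.drop v.length) hdrop).mp ?_
        intro k hk
        rw [List.drop_drop]
        rw [show v.length + k * v.length = (k+1) * v.length by ring]
        exact h (k + 1) (by omega)
      calc d = d.take v.length ++ d.drop v.length := (List.take_append_drop _ _).symm
        _ = v ++ (List.replicate n v).flatten := by rw [h0, hrest]
        _ = (List.replicate (n+1) v).flatten := by
              rw [List.replicate_succ, List.flatten_cons]
    · intro h
      subst h
      have hrest : ∀ k < n, (((List.replicate n v).flatten).drop (k * v.length)).take v.length = v :=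
        (ih ((List.replicate n v).flatten) (by simp)).mpr rfl
      intro k hk
      rw [List.replicate_succ, List.flatten_cons]
      cases k with
      | zero =>
        simpa using List.take_left' (l₂ := (List.replicate n v).flatten) (rfl : v.length = v.length)
      | succ k =>
        rw [show (k+1) * v.length = v.length + k * v.length by ring]
        rw [show (v ++ (List.replicate n v).flatten).drop (v.length + k * v.length)
              = ((List.replicate n v).flatten).drop (k * v.length) by simp [List.drop_append]]
        exact hrest k (by omega)

lemma mod_cast_eq (a b : Nat) : PySem.Int.mod a b = ((a % b : Nat) : Int) := by
  simp [PySem.Int.mod, Int.fmod_eq_emod]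

lemma floordiv_cast_eq (a b : Nat) : PySem.Int.floordiv a b = ((a / b : Nat) : Int) := by
  simp [PySem.Int.floordiv, Int.fdiv_eq_ediv]

theorem can_divide_spec : Claim_equal_can_divide := by
  intro dividend divisor _ hpre
  unfold Spec_can_divide can_divide can_divide_alt
  have hpre' : divisor ≠ "" := hpre
  have hv : divisor.toList ≠ [] := by simp [hpre']
  have hl2 : 0 < divisor.toList.length := List.length_pos_iff.mpr hv
  simp only [PySem.Str.len_eq, mod_cast_eq, floordiv_cast_eq, Int.toNat_natCast]
  set d := dividend.toList
  set v := divisor.toList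
  by_cases hm : d.length % v.length = 0
  · -- divisible: both sides are the chunk characterisation
    set n := d.length / v.length with hn
    have hlen : d.length = n * v.length := by
      rw [hn, Nat.div_mul_cancel (Nat.dvd_of_mod_eq_zero hm)]
    rw [if_neg (by simp [hm])]
    rw [Bool.eq_iff_iff]
    rw [List.all_eq_true, beq_iff_eq]
    constructor
    · intro h
      refine (chunks_iff v hv n d hlen).mp ?_
      intro k hk
      have hmem : ((k * v.length : Nat) : Int) ∈ PySem.List.pyRange 0 (d.length : Int) (v.length : Int) := by
        rw [PySem.List.mem_pyRange_iff_of_pos (by exact_mod_cast hl2)]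
        refine ⟨by positivity, ?_, by simp⟩
        have : k * v.length < n * v.length := by
          exact (Nat.mul_lt_mul_right hl2).mpr hk
        omega
      have := h _ hmem
      rw [show ((k * v.length : Nat) : Int) + (v.length : Int) = (((k * v.length : Nat) : Int) + ((v.length : Nat) : Int)) by simp] at this
      rw [PySem.List.slice_natCast_add] at this
      exact (beq_iff_eq).mp this
    · intro h x hx
      rw [PySem.List.mem_pyRange_iff_of_pos (by exact_mod_cast hl2)] at hx
      obtain ⟨hx0, hxl, hxd⟩ := hx
      obtain ⟨k, hk⟩ : ∃ k : Nat, x = ((k * v.length : Nat) : Int) := by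
        rw [Int.sub_zero] at hxd
        obtain ⟨c, hc⟩ := hxd
        refine ⟨c.toNat, ?_⟩
        have hc0 : 0 ≤ c := by
          by_contra hneg
          rw [Int.not_le] at hneg
          have : x < 0 := by
            rw [hc]
            have : (v.length : Int) * c ≤ (v.length : Int) * (-1) := by
              apply mul_le_mul_of_nonneg_left (by omega) (by positivity)
            omega
          omega
        rw [hc]
        push_cast [Int.toNat_of_nonneg hc0]
        ring
      subst hk
      have hklt : k < n := by
        have : (k * v.length : Nat) < d.length := by exact_mod_cast hxl
        rw [hlen] at this
        exact Nat.lt_of_mul_lt_mul_right this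
      rw [show ((k * v.length : Nat) : Int) + (v.length : Int) = (((k * v.length : Nat) : Int) + ((v.length : Nat) : Int)) by simp]
      rw [PySem.List.slice_natCast_add, beq_iff_eq]
      exact (chunks_iff v hv n d hlen).mpr h k hklt
  · -- not divisible: A returns false, and the repeated string has a different length
    rw [if_pos (by exact_mod_cast hm)]
    symm
    rw [beq_eq_false_iff_ne]
    intro hEq
    have hlenE : d.length = (d.length / v.length) * v.length := by
      have h := congrArg List.length hEq
      simpa [Nat.mul_comm] using h
    have hdvd : v.length ∣ d.length := by rw [hlenE]; exact Dvd.intro_left _ rfl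
    exact hm (Nat.mod_eq_zero_of_dvd hdvd)
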